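-- pv_equiv track=rewrite | github.com/1forij/-_DES | Self_Access_Centre/zixishi/des_test_modify.py | p_subs
-- ===== SOURCE A (Python) =====
-- def p_subs(r_s):
--     p_table = [
--         16,7,20,21,
--         29,12,28,17,
--         1,15,23,26,
--         5,18,31,10,
--         2,8,24,14,
--         32,27,3,9,
--         19,13,30,6,
--         22,11,4,25
--     ]
--     r_tmp = ''.join(r_s)
--     tmp = ''
--     res = []
--
--     for i in range(len(p_table)):
--         tmp += r_tmp[p_table[i]-1]
--         if len(tmp) % 8 == 0:
--             res.append(tmp)
--             tmp = ""
--
--     return res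
-- ===== SOURCE B (Python) =====
-- def p_subs(r_s):
--     p_table = [
--         16,7,20,21,
--         29,12,28,17,
--         1,15,23,26,
--         5,18,31,10,
--         2,8,24,14,
--         32,27,3,9,
--         19,13,30,6,
--         22,11,4,25
--     ]
--     r_tmp = ''.join(r_s)
--     perm = ''.join(r_tmp[p-1] for p in p_table)
--     return [perm[i:i+8] for i in range(0, len(perm), 8)]
-- ===== Notes on version B (the rewrite author's own statement) =====
-- stated objective: simpler
-- what changed: Replaces the single interleaved loop with a running counter and conditional flush by a build-then-chunk decomposition: first map the whole P-table to the permuted string, then slice it into 8-character groups in a separate pass.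
import Mathlib
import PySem

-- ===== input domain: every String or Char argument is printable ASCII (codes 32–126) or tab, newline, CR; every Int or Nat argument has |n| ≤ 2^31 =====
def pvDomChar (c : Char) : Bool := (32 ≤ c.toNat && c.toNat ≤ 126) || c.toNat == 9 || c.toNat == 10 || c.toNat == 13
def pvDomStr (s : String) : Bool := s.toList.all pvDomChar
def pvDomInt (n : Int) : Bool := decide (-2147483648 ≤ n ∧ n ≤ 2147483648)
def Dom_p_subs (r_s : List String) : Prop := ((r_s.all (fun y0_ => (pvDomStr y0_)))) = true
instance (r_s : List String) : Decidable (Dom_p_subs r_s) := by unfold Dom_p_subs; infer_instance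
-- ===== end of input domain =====

-- B builds the whole permuted string first and then chunks it into 8-character slices (build-then-chunk),
-- replacing A's interleaved accumulator with conditional flush; same cost, simpler decomposition.

-- ===== PORT A =====
-- ''.join(r_s) as a char list (both Pythons start with the same join)
def pJoin (r_s : List String) : List Char := PySem.Chars.join [] (r_s.map String.toList)

def pTable : List Int := [16,7,20,21,29,12,28,17,1,15,23,26,5,18,31,10,2,8,24,14,32,27,3,9,19,13,30,6,22,11,4,25]

-- A's loop: for i in range(len(p_table)): tmp += r_tmp[p_table[i]-1]; flush when len(tmp) % 8 == 0
def pSubsLoop (r_tmp : List Char) : List String :=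
  ((PySem.List.pyRange 0 (PySem.List.len pTable)).foldl
    (fun (st : List Char × List String) i =>
      let tmp := st.1 ++ [PySem.List.pyGetD r_tmp (PySem.List.pyGetD pTable i 0 - 1) ' ']
      if tmp.length % 8 == 0 then (([] : List Char), st.2 ++ [String.ofList tmp]) else (tmp, st.2))
    (([] : List Char), ([] : List String))).2

def p_subs (r_s : List String) : List String := pSubsLoop (pJoin r_s)

-- ===== PORT B =====
-- B: perm = ''.join(r_tmp[p-1] for p in p_table); return [perm[i:i+8] for i in range(0, len(perm), 8)]
def pSubsChunks (r_tmp : List Char) : List String :=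
  let perm := pTable.map (fun p => PySem.List.pyGetD r_tmp (p - 1) ' ')
  (PySem.List.pyRange 0 (PySem.List.len perm) 8).map
    (fun i => String.ofList (PySem.List.slice perm (some i) (some (i + 8))))

def p_subs_alt (r_s : List String) : List String := pSubsChunks (pJoin r_s)

-- ===== PRECONDITION & SPEC =====
-- Pre_ excludes exactly the inputs on which Python A raises IndexError: joined input shorter than 32 characters.
def Pre_p_subs (r_s : List String) : Prop := 32 ≤ (pJoin r_s).length
instance (r_s : List String) : Decidable (Pre_p_subs r_s) := by unfold Pre_p_subs; infer_instance
def pvWitness_p_subs : List String := ["0123456789abcdef", "ghijklmnopqrstuv"]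

def Spec_p_subs (r_s : List String) (out : List String) : Prop := out = p_subs_alt r_s
instance (r_s : List String) (out : List String) : Decidable (Spec_p_subs r_s out) := by unfold Spec_p_subs; infer_instance

-- ===== CLAIM (what is proved, stated in full; the proofs are below) =====
def Claim_equal_p_subs : Prop := ∀ (r_s : List String), Dom_p_subs r_s → Pre_p_subs r_s → Spec_p_subs r_s (p_subs r_s)

-- ===== LEMMAS AND PROOFS =====
-- A's loop body, as a step on the already-fetched character
def pvStep (st : List Char × List String) (c : Char) : List Char × List String :=
  let tmp := st.1 ++ [c]
  if tmp.length % 8 == 0 then (([] : List Char), st.2 ++ [String.ofList tmp]) else (tmp, st.2)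

-- A's range-indexed fold is the flush-fold over B's permuted character list
theorem loop_eq_fold (cs : List Char) :
    pSubsLoop cs =
      (List.foldl pvStep (([] : List Char), ([] : List String))
        (pTable.map (fun p => PySem.List.pyGetD cs (p - 1) ' '))).2 := by
  unfold pSubsLoop
  rw [List.foldl_map]
  rw [← PySem.List.map_pyGetD_pyRange_zero pTable 0, List.foldl_map]
  rfl

-- one 8-character block of the flush-fold appends one chunk and resets the accumulator
theorem fold_block (a b c d e f g h : Char) (res : List String) (rest : List Char) :
    List.foldl pvStep (([] : List Char), res) (a::b::c::d::e::f::g::h::rest) =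
      List.foldl pvStep (([] : List Char), res ++ [String.ofList [a,b,c,d,e,f,g,h]]) rest := by
  simp [pvStep, List.foldl]

theorem pSubs_core (cs : List Char) : pSubsLoop cs = pSubsChunks cs := by
  rw [loop_eq_fold]
  unfold pSubsChunks
  simp only [pTable, List.map_cons, List.map_nil]
  rw [fold_block, fold_block, fold_block, fold_block]
  norm_num [PySem.List.len, PySem.List.pyRange_of_pos, List.range_succ, Function.comp,
    PySem.List.slice_toNat]
  rfl

-- ===== VERDICT (by name: the statement is the Claim_ definition above) =====
theorem p_subs_spec : Claim_equal_p_subs := by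
  intro r_s _ _
  exact pSubs_core (pJoin r_s)
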